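-- pv_equiv track=rewrite | github.com/coxifred/pimpMySuperWatt | python/utils/functions.py | displayFromLastSeenPatternFromArray
-- ===== SOURCE A (Python) =====
-- def displayFromLastSeenPatternFromArray(string,array):
--         returnArray=[]
--         for line in array:
--                 if string in line:
--                         del returnArray[:]
--                         returnArray.append(line)
--                 else:
--                         returnArray.append(line)
--         return returnArray
-- ===== SOURCE B (Python) =====
-- def displayFromLastSeenPatternFromArray(string, array):
--     last = -1
--     for i, line in enumerate(array):
--         if string in line:
--             last = i
--     if last == -1:
--         return array[:]
--     return array[last:]
-- ===== Notes on version B (the rewrite author's own statement) =====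
-- stated objective: simpler
-- what changed: Replaces A's running buffer that is cleared and re-filled on every match with one pass recording the index of the last matching line followed by a single slice.
import Mathlib
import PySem

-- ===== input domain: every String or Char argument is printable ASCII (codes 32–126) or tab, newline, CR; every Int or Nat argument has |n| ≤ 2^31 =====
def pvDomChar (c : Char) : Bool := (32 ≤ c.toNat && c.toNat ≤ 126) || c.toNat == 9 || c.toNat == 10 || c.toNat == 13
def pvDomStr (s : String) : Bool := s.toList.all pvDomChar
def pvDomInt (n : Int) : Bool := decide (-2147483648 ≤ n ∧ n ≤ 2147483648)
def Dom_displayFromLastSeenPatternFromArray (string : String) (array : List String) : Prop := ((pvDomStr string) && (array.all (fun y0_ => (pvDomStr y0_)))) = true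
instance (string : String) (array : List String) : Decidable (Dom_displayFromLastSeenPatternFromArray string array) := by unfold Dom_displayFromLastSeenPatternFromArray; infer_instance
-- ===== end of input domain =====

-- B replaces A's clear-and-refill running buffer with a last-match-index scan and one slice (simpler decomposition, same cost).

-- ===== PORT A =====
-- for line in array: if string in line: del returnArray[:]; returnArray.append(line) else: returnArray.append(line)
def displayFromLastSeenPatternFromArray (string : String) (array : List String) : List String :=
  array.foldl
    (fun returnArray line =>
      if PySem.Str.isIn string line then [line] else returnArray ++ [line])
    []

-- ===== PORT B =====
-- last = -1; for i, line in enumerate(array): if string in line: last = i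
-- return array[:] if last == -1 else array[last:]
def displayFromLastSeenPatternFromArray_alt (string : String) (array : List String) : List String :=
  let last : Int :=
    (PySem.List.enumerate array 0).foldl
      (fun last p => if PySem.Str.isIn string p.2 then p.1 else last) (-1)
  if last = -1 then PySem.List.slice array none none
  else PySem.List.slice array (some last) none

-- ===== PRECONDITION & SPEC =====
def Spec_displayFromLastSeenPatternFromArray (string : String) (array : List String) (out : List String) : Prop := out = displayFromLastSeenPatternFromArray_alt string array
instance (string : String) (array : List String) (out : List String) : Decidable (Spec_displayFromLastSeenPatternFromArray string array out) := by unfold Spec_displayFromLastSeenPatternFromArray; infer_instance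

-- ===== CLAIM (what is proved, stated in full; the proofs are below) =====
def Claim_equal_displayFromLastSeenPatternFromArray : Prop := ∀ (string : String) (array : List String), Dom_displayFromLastSeenPatternFromArray string array → Spec_displayFromLastSeenPatternFromArray string array (displayFromLastSeenPatternFromArray string array)

-- ===== LEMMAS AND PROOFS =====

-- Joint invariant for both forward passes, proved by reverse induction on the list.
theorem pv_main (string : String) (l : List String) :
    (let last := (PySem.List.enumerate l 0).foldl
        (fun last p => if PySem.Str.isIn string p.2 then p.1 else last) (-1);
     let a := l.foldl
        (fun returnArray line =>
          if PySem.Str.isIn string line then [line] else returnArray ++ [line]) [];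
     (last = -1 ∧ a = l) ∨ (∃ k : Nat, last = (k : Int) ∧ k ≤ l.length ∧ a = l.drop k)) := by
  induction l using List.reverseRecOn with
  | nil => simp [PySem.List.enumerate]
  | append_singleton l x ih =>
    simp only at ih ⊢
    rw [PySem.List.enumerate_append, List.foldl_append, List.foldl_append]
    simp only [PySem.List.enumerate_cons, PySem.List.enumerate_nil, List.foldl_cons,
      List.foldl_nil, List.length_append, List.length_cons, List.length_nil, zero_add]
    by_cases hp : PySem.Str.isIn string x = true
    · rw [if_pos hp, if_pos hp]
      exact Or.inr ⟨l.length, rfl, by omega, by rw [List.drop_left]⟩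
    · rw [if_neg hp, if_neg hp]
      rcases ih with ⟨h1, h2⟩ | ⟨k, h1, h2, h3⟩
      · exact Or.inl ⟨h1, by rw [h2]⟩
      · exact Or.inr ⟨k, h1, by omega, by rw [h3, List.drop_append_of_le_length h2]⟩

theorem displayFromLastSeenPatternFromArray_eq (string : String) (array : List String) :
    displayFromLastSeenPatternFromArray string array
      = displayFromLastSeenPatternFromArray_alt string array := by
  have h := pv_main string array
  simp only at h
  unfold displayFromLastSeenPatternFromArray displayFromLastSeenPatternFromArray_alt
  rcases h with ⟨h1, h2⟩ | ⟨k, h1, h2, h3⟩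
  · simp only [h1, h2, if_pos, PySem.List.slice_none_none]
  · have hne : (k : Int) ≠ -1 := by omega
    simp only [h1, h3, if_neg hne, PySem.List.slice_from_natCast]

-- ===== VERDICT (by name: the statement is the Claim_ definition above) =====
theorem displayFromLastSeenPatternFromArray_spec : Claim_equal_displayFromLastSeenPatternFromArray := by
  intro string array _
  exact displayFromLastSeenPatternFromArray_eq string array
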